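-- pv_equiv track=rewrite | github.com/BokDoong/algorithm-sql | 프로그래머스/5/49190. 방의 개수/방의 개수.py | solution
-- ===== SOURCE A (Python) =====
-- def solution(arrows):
--     # 이동 벡터
--     dx = [0, 1, 1, 1, 0, -1, -1, -1]
--     dy = [-1, -1, 0, 1, 1, 1, 0, -1]
--
--     # 시작점, 방문 노드/간선
--     x, y = 0, 0
--     visitedNodes = set()
--     visitedNodes.add((x,y))
--     visitedRoutes = set()
--
--     # 탐색
--     cycle = 0
--     for arrow in arrows:
--         # 교차점을 정점으로 만들기 위해 2씩 이동
--         for _ in range(2):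
--             nx, ny = x + dx[arrow], y + dy[arrow]
--             if (nx, ny) in visitedNodes and (x, y, nx, ny) not in visitedRoutes:
--                 cycle += 1
--             visitedRoutes.add((x, y, nx, ny))
--             visitedRoutes.add((nx, ny, x, y))
--             visitedNodes.add((nx, ny))
--             x, y = nx, ny
--
--     return cycle
-- ===== SOURCE B (Python) =====
-- def solution(arrows):
--     # Build the full coordinate path first (2 half-steps per arrow, as in A),
--     # then count rooms as the cycle rank of the traced graph: since the walk is
--     # one connected trail, rooms = |edges| - |vertices| + 1 (Euler's formula).
--     dx = [0, 1, 1, 1, 0, -1, -1, -1]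
--     dy = [-1, -1, 0, 1, 1, 1, 0, -1]
--     path = [(0, 0)]
--     for a in arrows:
--         for _ in range(2):
--             x, y = path[-1]
--             path.append((x + dx[a], y + dy[a]))
--     vertices = set(path)
--     edges = {(p, q) if p <= q else (q, p) for p, q in zip(path, path[1:])}
--     return len(edges) - len(vertices) + 1
-- ===== Notes on version B (the rewrite author's own statement) =====
-- stated objective: alternative
-- what changed: Instead of counting cycles inline with a membership test against a both-direction route set, B records the traced path, then derives the answer by Euler's formula |edges| - |vertices| + 1 over the set of vertices and the set of direction-normalized undirected edges (the walk graph is connected).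
import Mathlib
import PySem

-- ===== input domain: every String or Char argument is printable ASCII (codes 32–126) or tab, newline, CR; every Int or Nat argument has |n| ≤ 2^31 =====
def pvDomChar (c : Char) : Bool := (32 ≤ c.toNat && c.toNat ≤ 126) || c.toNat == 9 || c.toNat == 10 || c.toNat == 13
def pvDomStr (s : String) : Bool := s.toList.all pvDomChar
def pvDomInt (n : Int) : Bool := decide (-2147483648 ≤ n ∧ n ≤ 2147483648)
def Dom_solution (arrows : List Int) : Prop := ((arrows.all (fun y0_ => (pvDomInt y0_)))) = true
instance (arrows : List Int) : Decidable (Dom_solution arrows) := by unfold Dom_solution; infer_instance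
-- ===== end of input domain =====

-- B replaces A's inline cycle counting (membership test against a both-direction route set)
-- by recording the traced path and returning |edges| - |vertices| + 1 (Euler's formula on the
-- connected walk graph); same walk, different counting. Objective: alternative (same cost).


-- ===== PORT A =====
def pvDx : List Int := [0, 1, 1, 1, 0, -1, -1, -1]
def pvDy : List Int := [-1, -1, 0, 1, 1, 1, 0, -1]

-- A's loop state: (x, y, visitedNodes, visitedRoutes, cycle)
abbrev pvStateA := Int × Int × PySem.Set (Int × Int) × PySem.Set (Int × Int × Int × Int) × Int

-- the body of A's inner `for _ in range(2)` loop (pyGetD's default is unreachable under Pre_)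
def pvStepA (st : pvStateA) (arrow : Int) : pvStateA :=
  let x := st.1; let y := st.2.1
  let nodes := st.2.2.1; let routes := st.2.2.2.1; let cycle := st.2.2.2.2
  let nx := x + PySem.List.pyGetD pvDx arrow 0
  let ny := y + PySem.List.pyGetD pvDy arrow 0
  let cycle := if PySem.Set.contains nodes (nx, ny) && !(PySem.Set.contains routes (x, y, nx, ny))
               then cycle + 1 else cycle
  let routes := PySem.Set.add (PySem.Set.add routes (x, y, nx, ny)) (nx, ny, x, y)
  let nodes := PySem.Set.add nodes (nx, ny)
  (nx, ny, nodes, routes, cycle)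

def solution (arrows : List Int) : Int :=
  let init : pvStateA :=
    (0, 0, PySem.Set.add PySem.Set.empty ((0 : Int), (0 : Int)), PySem.Set.empty, 0)
  let st := arrows.foldl
    (fun st arrow => (PySem.List.pyRange 0 2 1).foldl (fun st _ => pvStepA st arrow) st) init
  st.2.2.2.2

-- ===== PORT B =====
-- Python tuple comparison (x, y) <= (nx, ny) is lexicographic
def pvLexLe (p q : Int × Int) : Bool := p.1 < q.1 || (p.1 == q.1 && p.2 ≤ q.2)

-- (p, q) if p <= q else (q, p)
def pvNorm (p q : Int × Int) : (Int × Int) × (Int × Int) := if pvLexLe p q then (p, q) else (q, p)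

-- body of B's inner loop: path.append(path[-1] + delta)
def pvStepB (path : List (Int × Int)) (a : Int) : List (Int × Int) :=
  let xy := PySem.List.pyGetD path (-1) ((0 : Int), (0 : Int))
  path ++ [(xy.1 + PySem.List.pyGetD pvDx a 0, xy.2 + PySem.List.pyGetD pvDy a 0)]

def solution_alt (arrows : List Int) : Int :=
  let path := arrows.foldl
    (fun path a => (PySem.List.pyRange 0 2 1).foldl (fun path _ => pvStepB path a) path)
    [((0 : Int), (0 : Int))]
  let vertices := PySem.Set.ofList path
  let edges := PySem.Set.ofList ((path.zip path.tail).map (fun pq => pvNorm pq.1 pq.2))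
  (edges.length : Int) - (vertices.length : Int) + 1

-- ===== PRECONDITION & SPEC =====
-- Pre_ admits exactly the arrow values Python list indexing accepts on the 8-element
-- direction tables (−8 ≤ a < 8, negative = Python wraparound); outside, A raises IndexError.
def Pre_solution (arrows : List Int) : Prop := ∀ a ∈ arrows, -8 ≤ a ∧ a < 8
instance (arrows : List Int) : Decidable (Pre_solution arrows) := by unfold Pre_solution; infer_instance
def pvWitness_solution : List Int := [6, 6, 6, 4, 4, 4, 2, 2, 2, 0, 0, 0]

def Spec_solution (arrows : List Int) (out : Int) : Prop := out = solution_alt arrows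
instance (arrows : List Int) (out : Int) : Decidable (Spec_solution arrows out) := by unfold Spec_solution; infer_instance

-- ===== CLAIM (what is proved, stated in full; the proofs are below) =====
def Claim_equal_solution : Prop := ∀ (arrows : List Int), Dom_solution arrows → Pre_solution arrows → Spec_solution arrows (solution arrows)

-- ===== LEMMAS AND PROOFS =====

-- canonical vertex/edge counts of a path
def pvNodesLen (path : List (Int × Int)) : Int := ((PySem.Set.ofList path).length : Int)
def pvEdgesLen (path : List (Int × Int)) : Int :=
  (((PySem.Set.ofList ((path.zip path.tail).map (fun pq => pvNorm pq.1 pq.2))).length : Int))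

theorem pvLexLe_total (p q : Int × Int) : pvLexLe p q = true ∨ pvLexLe q p = true := by
  simp only [pvLexLe, Bool.or_eq_true, Bool.and_eq_true, decide_eq_true_eq, beq_iff_eq]
  omega

theorem pvLexLe_antisymm (p q : Int × Int) (h1 : pvLexLe p q = true) (h2 : pvLexLe q p = true) :
    p = q := by
  simp only [pvLexLe, Bool.or_eq_true, Bool.and_eq_true, decide_eq_true_eq, beq_iff_eq] at h1 h2
  have : p.1 = q.1 ∧ p.2 = q.2 := by omega
  exact Prod.ext this.1 this.2

theorem pvNorm_eq_iff (p q u v : Int × Int) :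
    pvNorm p q = pvNorm u v ↔ (p = u ∧ q = v) ∨ (p = v ∧ q = u) := by
  constructor
  · intro h
    unfold pvNorm at h
    split_ifs at h with h1 h2 h2 <;> simp only [Prod.mk.injEq] at h
    · exact Or.inl ⟨h.1, h.2⟩
    · exact Or.inr ⟨h.1, h.2⟩
    · exact Or.inr ⟨h.2, h.1⟩
    · exact Or.inl ⟨h.2, h.1⟩
  · intro h
    rcases h with ⟨h1, h2⟩ | ⟨h1, h2⟩
    · rw [h1, h2]
    · subst h1; subst h2
      unfold pvNorm
      split_ifs with h1 h2 h2
      · rw [pvLexLe_antisymm _ _ h1 h2]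
      · rfl
      · rfl
      · rcases pvLexLe_total p q with h | h
        · exact absurd h h1
        · exact absurd h h2

-- appending one point extends the segment list by (last, q)
theorem pvZip_append (path : List (Int × Int)) (q : Int × Int) (h : path ≠ []) :
    (path ++ [q]).zip (path ++ [q]).tail
      = path.zip path.tail ++ [(path.getLast h, q)] := by
  induction path with
  | nil => exact absurd rfl h
  | cons x xs ih =>
    cases xs with
    | nil => simp [List.zip]
    | cons y ys =>
      have := ih (by simp)
      simp only [List.cons_append, List.tail_cons, List.zip_cons_cons] at this ⊢
      rw [List.getLast_cons (by simp)]
      simp [this]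

theorem pvSet_add_length {α : Type} [BEq α] [LawfulBEq α] (s : PySem.Set α) (x : α) :
    (PySem.Set.add s x).length = if x ∈ s then s.length else s.length + 1 := by
  by_cases h : x ∈ s
  · simp [PySem.Set.add, h]
  · simp [PySem.Set.add, h]

-- an endpoint of a recorded segment is on the path
theorem pvMem_of_seg (path : List (Int × Int)) (u v : Int × Int)
    (h : (u, v) ∈ path.zip path.tail) : u ∈ path ∧ v ∈ path := by
  have h1 := List.of_mem_zip h
  exact ⟨h1.1, List.mem_of_mem_tail h1.2⟩

-- the MAIN INVARIANT: folding A's step over any move list, starting from a state that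
-- describes a nonempty path, yields cycle = |edges| - |vertices| + 1 of the extended path
theorem pvMain (ms : List Int) (path : List (Int × Int)) (hne : path ≠ [])
    (nodes : PySem.Set (Int × Int)) (routes : PySem.Set (Int × Int × Int × Int)) (cycle : Int)
    (hnodes : ∀ r, r ∈ nodes ↔ r ∈ path)
    (hroutes : ∀ t, t ∈ routes ↔ ∃ pq ∈ path.zip path.tail,
        t = (pq.1.1, pq.1.2, pq.2.1, pq.2.2) ∨ t = (pq.2.1, pq.2.2, pq.1.1, pq.1.2))
    (hcyc : cycle = pvEdgesLen path - pvNodesLen path + 1) :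
    (ms.foldl pvStepA ((path.getLast hne).1, (path.getLast hne).2, nodes, routes, cycle)).2.2.2.2
      = pvEdgesLen (ms.foldl pvStepB path) - pvNodesLen (ms.foldl pvStepB path) + 1 := by
  induction ms generalizing path nodes routes cycle with
  | nil => simpa using hcyc
  | cons a ms ih =>
    set p : Int × Int := path.getLast hne with hp
    set q : Int × Int := (p.1 + PySem.List.pyGetD pvDx a 0, p.2 + PySem.List.pyGetD pvDy a 0) with hq
    have hlastp : PySem.List.pyGetD path (-1) ((0 : Int), (0 : Int)) = p := by
      rw [hp]; exact PySem.List.pyGetD_neg_one path _ hne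
    have hstepB : pvStepB path a = path ++ [q] := by
      rw [hq]; simp [pvStepB, hlastp]
    -- membership bridges
    have hEmem : pvNorm p q ∈ (path.zip path.tail).map (fun pq => pvNorm pq.1 pq.2)
        ↔ ((p.1, p.2, q.1, q.2) : Int × Int × Int × Int) ∈ routes := by
      rw [hroutes]
      simp only [List.mem_map]
      constructor
      · rintro ⟨pq, hmem, heq⟩
        refine ⟨pq, hmem, ?_⟩
        rcases (pvNorm_eq_iff pq.1 pq.2 p q).mp heq with ⟨h1, h2⟩ | ⟨h1, h2⟩
        · left; rw [← h1, ← h2]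
        · right; rw [← h1, ← h2]
      · rintro ⟨pq, hmem, heq | heq⟩
        · refine ⟨pq, hmem, ?_⟩
          have h1 : p = pq.1 := by
            have := congrArg (fun t => (t.1, t.2.1)) heq; simpa [Prod.ext_iff] using this
          have h2 : q = pq.2 := by
            have := congrArg (fun t => (t.2.2.1, t.2.2.2)) heq; simpa [Prod.ext_iff] using this
          rw [h1, h2]
        · refine ⟨pq, hmem, ?_⟩
          have h1 : p = pq.2 := by
            have := congrArg (fun t => (t.1, t.2.1)) heq; simpa [Prod.ext_iff] using this
          have h2 : q = pq.1 := by
            have := congrArg (fun t => (t.2.2.1, t.2.2.2)) heq; simpa [Prod.ext_iff] using this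
          rw [h1, h2, pvNorm_eq_iff]; right; exact ⟨rfl, rfl⟩
    have hEq_mem : pvNorm p q ∈ (path.zip path.tail).map (fun pq => pvNorm pq.1 pq.2) → q ∈ path := by
      intro h
      rcases List.mem_map.mp h with ⟨pq, hmem, heq⟩
      rcases (pvNorm_eq_iff pq.1 pq.2 p q).mp heq with ⟨_, h2⟩ | ⟨h1, _⟩
      · exact h2 ▸ (pvMem_of_seg path pq.1 pq.2 (by simpa using hmem)).2
      · exact h1 ▸ (pvMem_of_seg path pq.1 pq.2 (by simpa using hmem)).1
    -- one A-step preserves the invariant for path ++ [q]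
    have hA : pvStepA (p.1, p.2, nodes, routes, cycle) a
        = (q.1, q.2, PySem.Set.add nodes q,
           PySem.Set.add (PySem.Set.add routes (p.1, p.2, q.1, q.2)) (q.1, q.2, p.1, p.2),
           if PySem.Set.contains nodes q && !(PySem.Set.contains routes (p.1, p.2, q.1, q.2))
           then cycle + 1 else cycle) := rfl
    have hne' : path ++ [q] ≠ [] := by simp
    have hlast' : (path ++ [q]).getLast hne' = q := List.getLast_append_singleton _
    have hzip := pvZip_append path q hne
    -- new cycle value
    have hcyc' :
        (if PySem.Set.contains nodes q && !(PySem.Set.contains routes (p.1, p.2, q.1, q.2))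
         then cycle + 1 else cycle)
        = pvEdgesLen (path ++ [q]) - pvNodesLen (path ++ [q]) + 1 := by
      have hE : pvEdgesLen (path ++ [q])
          = pvEdgesLen path
            + (if pvNorm p q ∈ (path.zip path.tail).map (fun pq => pvNorm pq.1 pq.2)
               then 0 else 1) := by
        unfold pvEdgesLen
        rw [hzip, List.map_append, List.map_singleton, PySem.Set.ofList_append_singleton,
            pvSet_add_length]
        have hiff : pvNorm (path.getLast hne) q ∈ PySem.Set.ofList ((path.zip path.tail).map (fun pq => pvNorm pq.1 pq.2))
            ↔ pvNorm p q ∈ (path.zip path.tail).map (fun pq => pvNorm pq.1 pq.2) := by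
          rw [PySem.Set.mem_ofList, hp]
        rw [if_congr hiff rfl rfl]
        split_ifs with h <;> push_cast <;> omega
      have hN : pvNodesLen (path ++ [q])
          = pvNodesLen path + (if q ∈ path then 0 else 1) := by
        unfold pvNodesLen
        rw [PySem.Set.ofList_append_singleton, pvSet_add_length,
            if_congr (PySem.Set.mem_ofList (y := q) (xs := path)) rfl rfl]
        split_ifs with h <;> push_cast <;> omega
      by_cases hEold : pvNorm p q ∈ (path.zip path.tail).map (fun pq => pvNorm pq.1 pq.2)
      · -- old edge: route present, endpoint visited, nothing changes
        have hroute : PySem.Set.contains routes (p.1, p.2, q.1, q.2) = true := by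
          rw [PySem.Set.contains_iff]; exact hEmem.mp hEold
        have hqpath : q ∈ path := hEq_mem hEold
        rw [hroute]
        simp only [Bool.not_true, Bool.and_false]
        rw [if_neg Bool.false_ne_true, hE, hN, if_pos hEold, if_pos hqpath]
        omega
      · have hroute : PySem.Set.contains routes (p.1, p.2, q.1, q.2) = false := by
          rw [Bool.eq_false_iff, Ne, PySem.Set.contains_iff]
          intro h; exact hEold (hEmem.mpr h)
        by_cases hqpath : q ∈ path
        · -- new edge to a visited node: one new room
          have hnode : PySem.Set.contains nodes q = true := by
            rw [PySem.Set.contains_iff, hnodes]; exact hqpath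
          rw [hroute, hnode]
          simp only [Bool.not_false, Bool.and_true]
          rw [if_pos trivial, hE, hN, if_neg hEold, if_pos hqpath]
          omega
        · -- new edge to a fresh node
          have hnode : PySem.Set.contains nodes q = false := by
            rw [Bool.eq_false_iff, Ne, PySem.Set.contains_iff, hnodes]; exact hqpath
          rw [hroute, hnode]
          simp only [Bool.false_and]
          rw [if_neg Bool.false_ne_true, hE, hN, if_neg hEold, if_neg hqpath]
          omega
    have hnodes' : ∀ r, r ∈ PySem.Set.add nodes q ↔ r ∈ path ++ [q] := by
      intro r
      rw [PySem.Set.mem_add, hnodes]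
      simp
    have hroutes' : ∀ t,
        t ∈ PySem.Set.add (PySem.Set.add routes (p.1, p.2, q.1, q.2)) (q.1, q.2, p.1, p.2)
          ↔ ∃ pq ∈ (path ++ [q]).zip (path ++ [q]).tail,
              t = (pq.1.1, pq.1.2, pq.2.1, pq.2.2) ∨ t = (pq.2.1, pq.2.2, pq.1.1, pq.1.2) := by
      intro t
      rw [PySem.Set.mem_add, PySem.Set.mem_add, hroutes, hzip]
      constructor
      · rintro ((⟨pq, hmem, hor⟩ | h) | h)
        · exact ⟨pq, by simp [hmem], hor⟩
        · exact ⟨(p, q), by simp [hp], Or.inl (by simp [h])⟩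
        · exact ⟨(p, q), by simp [hp], Or.inr (by simp [h])⟩
      · rintro ⟨pq, hmem, hor⟩
        rcases List.mem_append.mp hmem with hmem | hmem
        · exact Or.inl (Or.inl ⟨pq, hmem, hor⟩)
        · have hpq : pq = (p, q) := by simpa [hp] using hmem
          subst hpq
          rcases hor with h | h
          · exact Or.inl (Or.inr (by simp [h]))
          · exact Or.inr (by simp [h])
    have := ih (path ++ [q]) hne'
      (PySem.Set.add nodes q)
      (PySem.Set.add (PySem.Set.add routes (p.1, p.2, q.1, q.2)) (q.1, q.2, p.1, p.2))
      _ hnodes' hroutes' hcyc'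
    rw [List.foldl_cons, List.foldl_cons, hA, hstepB]
    rw [hlast'] at this
    exact this

-- both ports fold their step over the doubled move list
theorem pvSolution_eq (arrows : List Int) :
    solution arrows
      = ((arrows.flatMap (fun a => [a, a])).foldl pvStepA
          (0, 0, PySem.Set.add PySem.Set.empty ((0 : Int), (0 : Int)), PySem.Set.empty, 0)).2.2.2.2 := by
  unfold solution
  rw [List.foldl_flatMap]
  rfl

theorem pvSolutionAlt_path (arrows : List Int) :
    arrows.foldl
      (fun path a => (PySem.List.pyRange 0 2 1).foldl (fun path _ => pvStepB path a) path)
      [((0 : Int), (0 : Int))]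
      = (arrows.flatMap (fun a => [a, a])).foldl pvStepB [((0 : Int), (0 : Int))] := by
  rw [List.foldl_flatMap]
  rfl

-- ===== VERDICT (by name: the statement is the Claim_ definition above) =====
theorem solution_spec : Claim_equal_solution := by
  intro arrows _ _
  unfold Spec_solution
  rw [pvSolution_eq]
  unfold solution_alt
  rw [pvSolutionAlt_path]
  have h0 : ([((0 : Int), (0 : Int))] : List (Int × Int)) ≠ [] := by simp
  have := pvMain (arrows.flatMap (fun a => [a, a])) [((0 : Int), (0 : Int))] h0
    (PySem.Set.add PySem.Set.empty ((0 : Int), (0 : Int))) PySem.Set.empty 0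
    (by intro r; simp [PySem.Set.empty])
    (by intro t; simp [PySem.Set.empty, List.zip])
    (by simp [pvEdgesLen, pvNodesLen, PySem.Set.ofList, List.zip])
  simpa [pvEdgesLen, pvNodesLen] using this
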